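-- pv_equiv track=rewrite | github.com/pvtrov/algorithms-and-data-structures | excercises from course/exams/2019_20/kol zal1/zad3/zad3_longestimcomplete.py | longest_incomplete
-- ===== SOURCE A (Python) =====
-- def cutting(last_section):
--     first_number = last_section[0]
--     for i in range(len(last_section)-1, -1, -1):
--         if last_section[i] == first_number:
--             new_sect = last_section[i+1:]
--             return [new_sect, len(new_sect) + 1]
--
-- def longest_incomplete(A, k):
--     result = [[[]] for _ in range(len(A))]
--     result[0] = [[A[0]], 1]
--     for i in range(1, len(A)):
--         last_sect = result[i-1][0].copy()
--         length = result[i-1][1]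
--         if A[i] in result[i - 1][0]:
--             result[i] = [last_sect, len(last_sect)+1]
--             result[i][0].append(A[i])
--         else:
--             if len(result[i - 1][0]) + 1 < k:
--                 result[i] = [last_sect, len(last_sect)+1]
--                 result[i][0].append(A[i])
--             else:
--                 result[i] = cutting(result[i - 1][0])
--                 result[i][0].append(A[i])
--                 result[i][1] = len(result[i][0])
--
--     max_lenth = -1
--     for i in range(len(A)):
--         if result[i][1] > max_lenth:
--             max_lenth = result[i][1]
--
--     return max_lenth
-- ===== SOURCE B (Python) =====
-- def longest_incomplete(A, k):
--     # One pass with a sliding start index instead of a DP table of copied section lists.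
--     s = 0
--     best = 0
--     for i in range(len(A)):
--         if i > 0 and A[i] not in A[s:i] and i - s + 1 >= k:
--             j = i - 1
--             while A[j] != A[s]:
--                 j -= 1
--             s = j + 1
--         if i - s + 1 > best:
--             best = i - s + 1
--     return best
-- ===== Notes on version B (the rewrite author's own statement) =====
-- stated objective: alternative
-- what changed: Replaces A's DP table of per-step copied section lists with a single sliding start index into A, testing membership and cutting directly on the window in place, and tracking the running maximum on the fly.
import Mathlib
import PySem

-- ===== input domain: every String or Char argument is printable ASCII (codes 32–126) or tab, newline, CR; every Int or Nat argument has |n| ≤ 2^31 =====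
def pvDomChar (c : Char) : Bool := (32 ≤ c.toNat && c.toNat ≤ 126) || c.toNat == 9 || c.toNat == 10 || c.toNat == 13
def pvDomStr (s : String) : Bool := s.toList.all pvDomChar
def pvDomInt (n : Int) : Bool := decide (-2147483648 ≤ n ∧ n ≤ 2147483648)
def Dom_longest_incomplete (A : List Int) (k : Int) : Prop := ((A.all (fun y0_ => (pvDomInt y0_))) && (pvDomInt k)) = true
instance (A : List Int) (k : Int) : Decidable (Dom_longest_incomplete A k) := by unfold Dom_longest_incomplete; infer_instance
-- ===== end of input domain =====

-- B replaces A's DP table of copied section lists by a single sliding start index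
-- scanned in place, with no per-step list copies (objective: alternative).

-- ===== PORT A =====

-- for i in range(len(S)-1, -1, -1): if S[i] == first: return [S[i+1:], len(S[i+1:])+1]
-- structural recursion on the descending index; none = the loop fell through (never in A's runs)
def cuttingLoop (S : List Int) (first : Int) : Nat → Option (List Int × Int)
  | 0 =>
      if PySem.List.pyGet? S 0 = some first then
        let ns := PySem.List.slice S (some 1) none
        some (ns, (ns.length : Int) + 1)
      else none
  | p + 1 =>
      if PySem.List.pyGet? S ((p : Int) + 1) = some first then
        let ns := PySem.List.slice S (some ((p : Int) + 2)) none
        some (ns, (ns.length : Int) + 1)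
      else cuttingLoop S first p

def cutting (S : List Int) : Option (List Int × Int) :=
  match PySem.List.pyGet? S 0 with
  | none => none                     -- Python: S[0] raises IndexError on empty S (unreachable: sections are nonempty)
  | some first => cuttingLoop S first (S.length - 1)

-- one iteration of A's main loop; revres holds result[i-1], result[i-2], … (head = latest)
def buildStep (A : List Int) (k : Int) (revres : List (List Int × Int)) (i : Int) : List (List Int × Int) :=
  match revres with
  | [] => []                         -- unreachable: result[i-1] always exists
  | prev :: _ =>
    let last_sect := prev.1          -- .copy(): value identical
    let ai := (PySem.List.pyGet? A i).getD 0   -- A[i]; i ∈ range(1, len(A)) is always in range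
    if last_sect.contains ai then
      (last_sect ++ [ai], (last_sect.length : Int) + 1) :: revres
    else if (last_sect.length : Int) + 1 < k then
      (last_sect ++ [ai], (last_sect.length : Int) + 1) :: revres
    else
      match cutting last_sect with
      | none => revres               -- Python would raise here (unreachable: sections are nonempty)
      | some (ns, _) =>
        let sect := ns ++ [ai]
        (sect, (sect.length : Int)) :: revres   -- result[i][1] = len(result[i][0])

-- if result[i][1] > max_lenth: max_lenth = result[i][1]
def maxStep (m : Int) (e : List Int × Int) : Int := if e.2 > m then e.2 else m

def longest_incomplete (A : List Int) (k : Int) : Int :=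
  match PySem.List.pyGet? A 0 with
  | none => -1                       -- Python raises IndexError on empty A (excluded by Pre_)
  | some a0 =>
    let revres := (PySem.List.pyRange 1 (A.length : Int) 1).foldl (buildStep A k) [([a0], 1)]
    (revres.reverse).foldl maxStep (-1)

-- ===== PORT B =====

-- j = i - 1; while A[j] != A[s]: j -= 1   (d counts j - s; terminates at j = s)
def cutIdx (A : List Int) (s : Int) : Nat → Int
  | 0 => s
  | d + 1 =>
      if PySem.List.pyGet? A (s + (d : Int) + 1) ≠ PySem.List.pyGet? A s then cutIdx A s d
      else s + (d : Int) + 1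

def altStep (A : List Int) (k : Int) (st : Int × Int) (i : Int) : Int × Int :=
  let s := st.1
  let best := st.2
  let ai := (PySem.List.pyGet? A i).getD 0     -- A[i]; i ∈ range(len(A)) is in range
  let s' :=
    if i > 0 ∧ ¬ (PySem.List.slice A (some s) (some i)).contains ai ∧ i - s + 1 ≥ k
    then cutIdx A s (i - 1 - s).toNat + 1
    else s
  (s', if i - s' + 1 > best then i - s' + 1 else best)

def longest_incomplete_alt (A : List Int) (k : Int) : Int :=
  ((PySem.List.pyRange 0 (A.length : Int) 1).foldl (altStep A k) (0, 0)).2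

-- ===== PRECONDITION & SPEC =====
-- Python A evaluates A[0] unconditionally, so it raises IndexError exactly on empty A.
def Pre_longest_incomplete (A : List Int) (k : Int) : Prop := A ≠ []
instance (A : List Int) (k : Int) : Decidable (Pre_longest_incomplete A k) := by
  unfold Pre_longest_incomplete; infer_instance

def pvWitness_longest_incomplete : List Int × Int := ([2, 1, 2, 3], 3)

def Spec_longest_incomplete (A : List Int) (k : Int) (out : Int) : Prop := out = longest_incomplete_alt A k
instance (A : List Int) (k : Int) (out : Int) : Decidable (Spec_longest_incomplete A k out) := by
  unfold Spec_longest_incomplete; infer_instance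

-- ===== CLAIM (what is proved, stated in full; the proofs are below) =====
def Claim_equal_longest_incomplete : Prop := ∀ (A : List Int) (k : Int), Dom_longest_incomplete A k → Pre_longest_incomplete A k → Spec_longest_incomplete A k (longest_incomplete A k)


-- ===== LEMMAS AND PROOFS =====

-- the current section is always the contiguous window A[s:i]
def sect (A : List Int) (s i : Nat) : List Int := (A.drop s).take (i - s)

lemma sect_length (A : List Int) (s i : Nat) (hs : s ≤ i) (hi : i ≤ A.length) :
    (sect A s i).length = i - s := by
  simp [sect]; omega

lemma sect_extend (A : List Int) (s i : Nat) (hs : s ≤ i) (hi : i < A.length) :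
    sect A s i ++ [(PySem.List.pyGet? A (i : Int)).getD 0] = sect A s (i + 1) := by
  have h1 : (PySem.List.pyGet? A (i : Int)).getD 0 = A.getD i 0 := by
    simp [PySem.List.pyGet?_natCast, List.getD, List.getElem?_eq_getElem hi]
  have h2 : (A.drop s)[i - s]? = some (A.getD i 0) := by
    rw [List.getElem?_drop]
    have : s + (i - s) = i := by omega
    rw [this]
    simp [List.getD, List.getElem?_eq_getElem hi]
  simp only [sect, h1]
  rw [show i + 1 - s = (i - s) + 1 by omega, List.take_succ, h2]
  simp

lemma sect_drop (A : List Int) (s i m : Nat) :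
    (sect A s i).drop m = sect A (s + m) i := by
  simp [sect, List.drop_take, List.drop_drop]
  congr 1
  omega

lemma sect_get (A : List Int) (s i m : Nat) (hm : m < i - s) (hi : i ≤ A.length) :
    PySem.List.pyGet? (sect A s i) (m : Int) = PySem.List.pyGet? A ((s + m : Nat) : Int) := by
  simp only [PySem.List.pyGet?_natCast, sect]
  rw [List.getElem?_take_of_lt hm, List.getElem?_drop]

lemma sect_head (A : List Int) (s i : Nat) (hs : s < i) (hi : i ≤ A.length) :
    PySem.List.pyGet? (sect A s i) 0 = some ((PySem.List.pyGet? A (s : Int)).getD 0) := by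
  have h := sect_get A s i 0 (by omega) hi
  have hsl : s < A.length := by omega
  simpa [PySem.List.pyGet?_natCast, List.getElem?_eq_getElem hsl] using h

lemma sect_tail_from (A : List Int) (s i : Nat) (m : Int) (hm : 0 ≤ m) :
    PySem.List.slice (sect A s i) (some m) none = sect A (s + m.toNat) i := by
  rw [PySem.List.slice_from _ hm, sect_drop]

-- the backward scans of A's cutting and of B's while loop find the same place
lemma cut_corresp (A : List Int) (s i : Nat) (hs : s < i) (hi : i ≤ A.length) :
    ∀ d : Nat, s + d < i →
      ∃ j : Nat, s ≤ j ∧ j ≤ s + d ∧ cutIdx A (s : Int) d = (j : Int) ∧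
        cuttingLoop (sect A s i) ((PySem.List.pyGet? A (s : Int)).getD 0) d =
          some (sect A (j + 1) i, ((i - (j + 1) : Nat) : Int) + 1) := by
  intro d
  induction d with
  | zero =>
    intro _
    refine ⟨s, le_refl s, by omega, rfl, ?_⟩
    rw [cuttingLoop, if_pos (sect_head A s i hs hi)]
    have h1 : PySem.List.slice (sect A s i) (some 1) none = sect A (s + 1) i := by
      simpa using sect_tail_from A s i 1 (by omega)
    simp only [h1, sect_length A (s + 1) i (by omega) hi]
  | succ d ih =>
    intro hd
    have hsd : s + d + 1 < A.length := by omega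
    have hsl : s < A.length := by omega
    obtain ⟨vd, hvd⟩ : ∃ v, A[s + d + 1]? = some v := ⟨_, List.getElem?_eq_getElem hsd⟩
    obtain ⟨vs, hvs⟩ : ∃ v, A[s]? = some v := ⟨_, List.getElem?_eq_getElem hsl⟩
    have hgd : PySem.List.pyGet? (sect A s i) ((d : Int) + 1) = some vd := by
      have := sect_get A s i (d + 1) (by omega) hi
      rw [show ((d + 1 : Nat) : Int) = (d : Int) + 1 by push_cast; ring] at this
      rw [this, PySem.List.pyGet?_natCast, show s + (d + 1) = s + d + 1 by omega, hvd]
    have hga : PySem.List.pyGet? A ((s : Int) + (d : Int) + 1) = some vd := by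
      rw [show (s : Int) + (d : Int) + 1 = ((s + d + 1 : Nat) : Int) by push_cast; ring,
        PySem.List.pyGet?_natCast, hvd]
    have hgs : PySem.List.pyGet? A (s : Int) = some vs := by
      rw [PySem.List.pyGet?_natCast, hvs]
    have hfirst : (PySem.List.pyGet? A (s : Int)).getD 0 = vs := by rw [hgs]; rfl
    by_cases heq : vd = vs
    · -- the scans stop here
      refine ⟨s + d + 1, by omega, by omega, ?_, ?_⟩
      · rw [cutIdx, if_neg (by rw [hga, hgs, heq]; simp)]
        push_cast; ring
      · rw [cuttingLoop, if_pos (by rw [hgd, hfirst, heq])]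
        have h2 : PySem.List.slice (sect A s i) (some ((d : Int) + 2)) none =
            sect A (s + d + 1 + 1) i := by
          have := sect_tail_from A s i ((d : Int) + 2) (by omega)
          rw [show ((d : Int) + 2).toNat = d + 2 by omega] at this
          rw [this, show s + (d + 2) = s + d + 1 + 1 by omega]
        simp only [h2]
        rw [sect_length A (s + d + 1 + 1) i (by omega) hi]
    · -- both scans step down and recurse
      obtain ⟨j, hj1, hj2, hj3, hj4⟩ := ih (by omega)
      refine ⟨j, hj1, by omega, ?_, ?_⟩
      · rw [cutIdx, if_pos (by rw [hga, hgs]; simp [heq]), hj3]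
      · rw [cuttingLoop, if_neg (by rw [hgd, hfirst]; simp [heq]), hj4]

-- A's max loop folds `maxStep` over the entries in either order (max is commutative)
lemma maxStep_rev (l : List (List Int × Int)) (e : List Int × Int) (a : Int) :
    ((e :: l).reverse).foldl maxStep a = maxStep (l.reverse.foldl maxStep a) e := by
  simp [List.foldl_append]

-- the main simulation: from index i on, both loops compute the same maximum
lemma main_sim (A : List Int) (k : Int) :
    ∀ (c i s : Nat) (rest : List (List Int × Int)),
      A.length - i = c → 1 ≤ i → i ≤ A.length → s < i →
      (((PySem.List.pyRange (i : Int) (A.length : Int) 1).foldl (buildStep A k)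
          ((sect A s i, ((i - s : Nat) : Int)) :: rest)).reverse).foldl maxStep (-1)
        = ((PySem.List.pyRange (i : Int) (A.length : Int) 1).foldl (altStep A k)
            ((s : Int), (((sect A s i, ((i - s : Nat) : Int)) :: rest).reverse).foldl maxStep (-1))).2 := by
  intro c
  induction c with
  | zero =>
    intro i s rest hc h1 h2 h3
    have hie : ((A.length : Nat) : Int) ≤ (i : Int) := by omega
    simp [pysem, hie]
  | succ c ih =>
    intro i s rest hc h1 h2 h3
    have hil : i < A.length := by omega
    have hsl : s < A.length := by omega
    have hlt : (i : Int) < ((A.length : Nat) : Int) := by omega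
    rw [PySem.List.pyRange_one_cons hlt, List.foldl_cons, List.foldl_cons]
    have hslice : PySem.List.slice A (some (s : Int)) (some (i : Int)) = sect A s i := by
      rw [PySem.List.slice_natCast]; rfl
    have hipos : (0 : Int) < (i : Int) := by omega
    obtain ⟨vi, hvi⟩ : ∃ v, A[i]? = some v := ⟨_, List.getElem?_eq_getElem hil⟩
    have hai : (PySem.List.pyGet? A (i : Int)).getD 0 = vi := by
      rw [PySem.List.pyGet?_natCast, hvi]; rfl
    have hext : sect A s i ++ [vi] = sect A s (i + 1) := by
      rw [← hai]; exact sect_extend A s i (by omega) hil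
    have hlen : (sect A s i).length = i - s := sect_length A s i (by omega) h2
    have hcast1 : ((i - s : Nat) : Int) + 1 = ((i + 1 - s : Nat) : Int) := by omega
    have hcast2 : (i : Int) - (s : Int) + 1 = ((i + 1 - s : Nat) : Int) := by omega
    have hrange : PySem.List.pyRange ((i : Int) + 1) ((A.length : Nat) : Int) 1 =
        PySem.List.pyRange (((i + 1 : Nat) : Nat) : Int) ((A.length : Nat) : Int) 1 := by
      push_cast; ring_nf
    by_cases hmem : (sect A s i).contains vi
    · -- A[i] already in the section: both sides extend the window
      have hA : buildStep A k ((sect A s i, ((i - s : Nat) : Int)) :: rest) (i : Int) =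
          (sect A s (i + 1), ((i + 1 - s : Nat) : Int)) ::
            (sect A s i, ((i - s : Nat) : Int)) :: rest := by
        simp only [buildStep, hai, if_pos hmem, hext, hlen, hcast1]
      have hB : altStep A k ((s : Int),
            (((sect A s i, ((i - s : Nat) : Int)) :: rest).reverse).foldl maxStep (-1)) (i : Int) =
          ((s : Int), (((sect A s (i + 1), ((i + 1 - s : Nat) : Int)) ::
            (sect A s i, ((i - s : Nat) : Int)) :: rest).reverse).foldl maxStep (-1)) := by
        conv_rhs => rw [maxStep_rev]
        simp only [altStep, hslice, hai]
        rw [if_neg (fun h => h.2.1 hmem)]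
        simp only [maxStep, hcast2]
      rw [hA, hB, hrange]
      exact ih (i + 1) s _ (by omega) (by omega) (by omega) (by omega)
    · by_cases hk : ((i - s : Nat) : Int) + 1 < k
      · -- new element, section still short: both sides extend the window
        have hA : buildStep A k ((sect A s i, ((i - s : Nat) : Int)) :: rest) (i : Int) =
            (sect A s (i + 1), ((i + 1 - s : Nat) : Int)) ::
              (sect A s i, ((i - s : Nat) : Int)) :: rest := by
          simp only [buildStep, hai, if_neg hmem, hlen, hcast1]
          rw [if_pos (show ((i + 1 - s : Nat) : Int) < k by omega), hext]
        have hB : altStep A k ((s : Int),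
              (((sect A s i, ((i - s : Nat) : Int)) :: rest).reverse).foldl maxStep (-1)) (i : Int) =
            ((s : Int), (((sect A s (i + 1), ((i + 1 - s : Nat) : Int)) ::
              (sect A s i, ((i - s : Nat) : Int)) :: rest).reverse).foldl maxStep (-1)) := by
          conv_rhs => rw [maxStep_rev]
          simp only [altStep, hslice, hai]
          rw [if_neg (by
            rintro ⟨-, -, hge⟩
            rw [hcast2] at hge
            omega)]
          simp only [maxStep, hcast2]
        rw [hA, hB, hrange]
        exact ih (i + 1) s _ (by omega) (by omega) (by omega) (by omega)
      · -- new element, section full: both sides cut at the same place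
        obtain ⟨j, hj1, hj2, hj3, hj4⟩ :=
          cut_corresp A s i h3 h2 (i - 1 - s) (by omega)
        have hcutting : cutting (sect A s i) =
            some (sect A (j + 1) i, ((i - (j + 1) : Nat) : Int) + 1) := by
          rw [cutting, sect_head A s i h3 h2]
          rw [show (sect A s i).length - 1 = i - 1 - s by omega]
          exact hj4
        have hextj : sect A (j + 1) i ++ [vi] = sect A (j + 1) (i + 1) := by
          rw [← hai]; exact sect_extend A (j + 1) i (by omega) hil
        have hlenj : (sect A (j + 1) (i + 1)).length = i + 1 - (j + 1) :=
          sect_length A (j + 1) (i + 1) (by omega) (by omega)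
        have hA : buildStep A k ((sect A s i, ((i - s : Nat) : Int)) :: rest) (i : Int) =
            (sect A (j + 1) (i + 1), ((i + 1 - (j + 1) : Nat) : Int)) ::
              (sect A s i, ((i - s : Nat) : Int)) :: rest := by
          simp only [buildStep, hai, if_neg hmem, hlen, hcast1]
          rw [if_neg (show ¬ ((i + 1 - s : Nat) : Int) < k by omega), hcutting]
          simp only [hextj, hlenj]
        have hcut' : cutIdx A (s : Int) ((i : Int) - 1 - (s : Int)).toNat = (j : Int) := by
          rw [show ((i : Int) - 1 - (s : Int)).toNat = i - 1 - s by omega]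
          exact hj3
        have hcast3 : (i : Int) - ((j : Int) + 1) + 1 = ((i + 1 - (j + 1) : Nat) : Int) := by
          omega
        have hB : altStep A k ((s : Int),
              (((sect A s i, ((i - s : Nat) : Int)) :: rest).reverse).foldl maxStep (-1)) (i : Int) =
            (((j : Int) + 1), (((sect A (j + 1) (i + 1), ((i + 1 - (j + 1) : Nat) : Int)) ::
              (sect A s i, ((i - s : Nat) : Int)) :: rest).reverse).foldl maxStep (-1)) := by
          conv_rhs => rw [maxStep_rev]
          simp only [altStep, hslice, hai]
          rw [if_pos ⟨hipos, hmem, by rw [hcast2]; omega⟩, hcut']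
          simp only [maxStep, hcast3]
        rw [hA, hB, hrange]
        have := ih (i + 1) (j + 1) ((sect A s i, ((i - s : Nat) : Int)) :: rest)
          (by omega) (by omega) (by omega) (by omega)
        rw [show (((j + 1 : Nat) : Nat) : Int) = (j : Int) + 1 by push_cast; ring] at this
        exact this

-- ===== VERDICT (by name: the statement is the Claim_ definition above) =====
theorem longest_incomplete_spec : Claim_equal_longest_incomplete := by
  intro A k _ hpre
  unfold Spec_longest_incomplete
  obtain ⟨a0, t, rfl⟩ : ∃ a0 t, A = a0 :: t := by
    cases A with
    | nil => exact absurd rfl hpre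
    | cons a0 t => exact ⟨a0, t, rfl⟩
  unfold longest_incomplete longest_incomplete_alt
  rw [PySem.List.pyGet?_zero_cons]
  have hn : (0 : Int) < (((a0 :: t).length : Nat) : Int) := by
    simp
  rw [PySem.List.pyRange_one_cons hn, List.foldl_cons]
  have h0 : altStep (a0 :: t) k (0, 0) 0 = (0, 1) := by
    simp [altStep]
  rw [h0]
  have hmain := main_sim (a0 :: t) k ((a0 :: t).length - 1) 1 0 []
    (by omega) (by omega) (by simp) (by omega)
  have hsect : sect (a0 :: t) 0 1 = [a0] := by simp [sect]
  have hone : ((1 - 0 : Nat) : Int) = 1 := by norm_num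
  rw [hsect, hone] at hmain
  have hbest : (([([a0], (1 : Int))]).reverse).foldl maxStep (-1) = 1 := by
    simp [maxStep]
  rw [hbest] at hmain
  simp only [Nat.cast_one, Nat.cast_zero] at hmain
  rw [show ((0 : Int) + 1) = 1 by norm_num]
  exact hmain
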